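-- pv_equiv track=rewrite | github.com/Evakung-github/Coursera_Data-Structures-and-Algorithms-Specialization | 4. Algorithms on Strings/week2/bwmatching/bwmatching.py | PreprocessBWT
-- ===== SOURCE A (Python) =====
-- def PreprocessBWT(bwt):
--   """
--   Preprocess the Burrows-Wheeler Transform bwt of some text
--   and compute as a result:
--     * starts - for each character C in bwt, starts[C] is the first position
--         of this character in the sorted array of
--         all characters of the text.
--     * occ_count_before - for each character C in bwt and each position P in bwt,
--         occ_count_before[C][P] is the number of occurrences of character C in bwt
--         from position 0 to position P inclusive.
--   """
--   # Implement this function yourself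
--   first_pos = {"A":0,"C":0,"G":0,"T":0,"$":0}
-- #  occ_counts_before = {("A",0):0,("C",0):0,("G",0):0,("T",0):0,("$",0):0}
--   occ_counts_before = {"A":{0:0},"C":{0:0},"G":{0:0},"T":{0:0},"$":{0:0}}
--   for i in bwt:
--       first_pos[i]+=1
--   s = sorted(first_pos.keys())
--   cum = 0
--   for i in range(len(s)):
--       t = first_pos[s[i]]
--       first_pos[s[i]] = cum
--       cum += t
--
--   for i,c in enumerate(bwt):
--       for j in s:
-- #          occ_counts_before[(j,i+1)] = occ_counts_before[(j,i)]
--           occ_counts_before[j][i+1] = occ_counts_before[j][i]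
-- #      occ_counts_before[(c,i+1)] += 1
--       occ_counts_before[c][i+1] += 1
--
--   return first_pos, occ_counts_before
-- ===== SOURCE B (Python) =====
-- def PreprocessBWT(bwt):
--   """Same starts computation as A; the occurrence table is transposed: one
--   running counter per alphabet symbol over a single scan each, instead of
--   copying the whole previous column at every position."""
--   first_pos = {"A": 0, "C": 0, "G": 0, "T": 0, "$": 0}
--   for ch in bwt:
--     first_pos[ch] += 1
--   cum = 0
--   for c in sorted(first_pos):
--     t = first_pos[c]
--     first_pos[c] = cum
--     cum += t
--   occ_counts_before = {}
--   for c in "ACGT$":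
--     run = 0
--     column = {0: 0}
--     for i, ch in enumerate(bwt):
--       if ch == c:
--         run += 1
--       column[i + 1] = run
--     occ_counts_before[c] = column
--   return first_pos, occ_counts_before
-- ===== Notes on version B (the rewrite author's own statement) =====
-- stated objective: alternative
-- what changed: The occurrence table is built with one independent running counter per alphabet symbol (per-character prefix sums, one scan per symbol) instead of copying the whole previous 5-entry column at every text position; the starts computation is kept.
import Mathlib
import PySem

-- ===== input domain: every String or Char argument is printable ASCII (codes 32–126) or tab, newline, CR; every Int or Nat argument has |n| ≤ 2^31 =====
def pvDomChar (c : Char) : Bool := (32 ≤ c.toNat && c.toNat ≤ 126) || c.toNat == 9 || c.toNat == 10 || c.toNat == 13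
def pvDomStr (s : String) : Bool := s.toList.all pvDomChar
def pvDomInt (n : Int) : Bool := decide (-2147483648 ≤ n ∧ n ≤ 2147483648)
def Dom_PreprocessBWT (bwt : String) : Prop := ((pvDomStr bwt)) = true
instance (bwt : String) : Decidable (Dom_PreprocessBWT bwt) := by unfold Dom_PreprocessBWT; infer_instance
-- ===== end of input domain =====

-- B builds the occurrence table with one running counter per alphabet symbol (a single
-- scan per character) instead of copying the whole previous column at every position;
-- objective: alternative decomposition, same asymptotic cost.


-- ===== PORT A =====
-- literal transliteration of A: dict of counts mutated in place, sorted keys, cumulative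
-- sweep, then for every position a copy of the whole previous column followed by the +1.
def PreprocessBWT (bwt : String) : (List (String × Int)) × (List (String × List (Int × Int))) :=
  let first_pos0 : PySem.Dict String Int :=
    PySem.Dict.ofList [("A",0),("C",0),("G",0),("T",0),("$",0)]
  let occ0 : PySem.Dict String (PySem.Dict Int Int) :=
    PySem.Dict.ofList [("A", PySem.Dict.ofList [(0,0)]), ("C", PySem.Dict.ofList [(0,0)]),
                       ("G", PySem.Dict.ofList [(0,0)]), ("T", PySem.Dict.ofList [(0,0)]),
                       ("$", PySem.Dict.ofList [(0,0)])]
  -- for i in bwt: first_pos[i] += 1   (KeyError outside Pre_; Dict.modify is the in-place update)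
  let fp1 := bwt.toList.foldl (fun d c => d.modify (String.ofList [c]) 0 (· + 1)) first_pos0
  -- s = sorted(first_pos.keys())
  let s := PySem.List.sorted fp1.keys (fun k => k) false
  -- for i in range(len(s)): t = first_pos[s[i]]; first_pos[s[i]] = cum; cum += t
  let fp2 := (s.foldl (fun st k => (st.1.insert k st.2, st.2 + st.1.getD k 0)) (fp1, (0:Int))).1
  -- for i,c in enumerate(bwt): for j in s: occ[j][i+1] = occ[j][i] ; occ[c][i+1] += 1
  let occ1 := (PySem.List.enumerate bwt.toList 0).foldl
    (fun o ic =>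
      let o1 := s.foldl
        (fun o j => o.modify j PySem.Dict.empty
          (fun d => d.insert (ic.1 + 1) (d.getD ic.1 0))) o
      o1.modify (String.ofList [ic.2]) PySem.Dict.empty
        (fun d => d.insert (ic.1 + 1) (d.getD (ic.1 + 1) 0 + 1))) occ0
  (fp2.items, occ1.items.map (fun kv => (kv.1, kv.2.items)))

-- ===== PORT B =====
-- literal transliteration of B (Source B): same starts pipeline as A; the occurrence table
-- is built with one running counter per alphabet symbol, one scan each.
def PreprocessBWT_alt (bwt : String) : (List (String × Int)) × (List (String × List (Int × Int))) :=
  let first_pos0 : PySem.Dict String Int :=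
    PySem.Dict.ofList [("A",0),("C",0),("G",0),("T",0),("$",0)]
  -- for ch in bwt: first_pos[ch] += 1
  let fp1 := bwt.toList.foldl (fun d ch => d.modify (String.ofList [ch]) 0 (· + 1)) first_pos0
  -- cum = 0; for c in sorted(first_pos): t = first_pos[c]; first_pos[c] = cum; cum += t
  let fp2 := ((PySem.List.sorted fp1.keys (fun k => k) false).foldl
      (fun st c => (st.1.insert c st.2, st.2 + st.1.getD c 0)) (fp1, (0:Int))).1
  -- for c in "ACGT$": run = 0; column = {0:0}; for i,ch in enumerate(bwt): …
  let occ := (['A','C','G','T','$'] : List Char).foldl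
      (fun o c =>
        let col := (PySem.List.enumerate bwt.toList 0).foldl
          (fun st p =>
            let run := if p.2 == c then st.2 + 1 else st.2
            (st.1.insert (p.1 + 1) run, run))
          ((PySem.Dict.ofList [((0:Int),(0:Int))] : PySem.Dict Int Int), (0:Int))
        o.insert (String.ofList [c]) col.1)
      (PySem.Dict.empty : PySem.Dict String (PySem.Dict Int Int))
  (fp2.items, occ.items.map (fun kv => (kv.1, kv.2.items)))

-- ===== PRECONDITION & SPEC =====
-- Pre_: A does first_pos[i] += 1 and raises KeyError on any character outside "ACGT$".
def Pre_PreprocessBWT (bwt : String) : Prop :=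
  (bwt.toList.all (fun c => (['A','C','G','T','$'] : List Char).contains c)) = true
instance (bwt : String) : Decidable (Pre_PreprocessBWT bwt) := by
  unfold Pre_PreprocessBWT; infer_instance
def pvWitness_PreprocessBWT : String := "AGGGAA$T"

def Spec_PreprocessBWT (bwt : String) (out : (List (String × Int)) × (List (String × List (Int × Int)))) : Prop := out = PreprocessBWT_alt bwt
instance (bwt : String) (out : (List (String × Int)) × (List (String × List (Int × Int)))) : Decidable (Spec_PreprocessBWT bwt out) := by unfold Spec_PreprocessBWT; infer_instance

-- ===== CLAIM (what is proved, stated in full; the proofs are below) =====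
def Claim_equal_PreprocessBWT : Prop := ∀ (bwt : String), Dom_PreprocessBWT bwt → Pre_PreprocessBWT bwt → Spec_PreprocessBWT bwt (PreprocessBWT bwt)
-- ===== LEMMAS AND PROOFS =====

def tbl (p : List Char) (c : Char) : List (Int × Int) :=
  (List.range (p.length + 1)).map (fun n : Nat => ((n : Int), ((p.take n).count c : Int)))

theorem tbl_nil (c : Char) : tbl [] c = [(0,0)] := by simp [tbl]

theorem tbl_append (p : List Char) (x c : Char) :
    tbl (p ++ [x]) c = tbl p c ++ [(((p.length : Int) + 1), ((p.count c : Int) + if x == c then 1 else 0))] := by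
  unfold tbl
  rw [show (p ++ [x]).length = p.length + 1 by simp, List.range_succ, List.map_append]
  congr 1
  · apply List.map_congr_left
    intro n hn
    simp only [List.mem_range] at hn
    rw [List.take_append_of_le_length (by omega)]
  · simp only [List.map_cons, List.map_nil, List.take_of_length_le (by simp : (p ++ [x]).length ≤ p.length + 1), List.count_append]
    split <;> rename_i h
    · have hx : x = c := by simpa using h
      subst hx; simp
    · have hx : x ≠ c := by simpa using h
      simp [List.count_singleton, hx, Ne.symm hx]

theorem map_fst_tbl (p : List Char) (c : Char) :
    (tbl p c).map (·.1) = (List.range (p.length + 1)).map (fun n : Nat => (n : Int)) := by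
  simp [tbl, List.map_map, Function.comp_def]

theorem nodup_keys_tbl (p : List Char) (c : Char) : (PySem.Dict.mk (tbl p c)).keys.Nodup := by
  show ((tbl p c).map (·.1)).Nodup
  rw [map_fst_tbl]
  exact (List.nodup_range).map (fun a b h => by exact_mod_cast h)

theorem mem_tbl_last (p : List Char) (c : Char) :
    ((p.length : Int), (p.count c : Int)) ∈ tbl p c := by
  unfold tbl
  refine List.mem_map.mpr ⟨p.length, by simp, by simp⟩

theorem getD_tbl_last (p : List Char) (c : Char) :
    (PySem.Dict.mk (tbl p c)).getD (p.length : Int) 0 = (p.count c : Int) := by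
  apply PySem.Dict.getD_of_mem_items
  · exact mem_tbl_last p c
  · exact nodup_keys_tbl p c

theorem insert_fresh {κ ν : Type} [BEq κ] [LawfulBEq κ] (d : PySem.Dict κ ν) (k : κ) (v : ν)
    (h : d.contains k = false) : d.insert k v = PySem.Dict.mk (d.items ++ [(k, v)]) := by
  apply PySem.Dict.ext
  simp [PySem.Dict.items_insert_of_not_contains, h]

theorem not_contains_tbl_succ (p : List Char) (c : Char) :
    (PySem.Dict.mk (tbl p c)).contains ((p.length : Int) + 1) = false := by
  rw [PySem.Dict.contains_eq_decide_mem_keys]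
  simp only [decide_eq_false_iff_not]
  show ((p.length : Int) + 1) ∉ (tbl p c).map (·.1)
  rw [map_fst_tbl]
  simp only [List.mem_map, List.mem_range]
  rintro ⟨n, hn, he⟩
  omega

theorem colB (l : List Char) (c : Char) :
    (PySem.List.enumerate l 0).foldl
      (fun st p =>
        let run := if p.2 == c then st.2 + 1 else st.2
        (st.1.insert (p.1 + 1) run, run))
      ((PySem.Dict.ofList [((0:Int),(0:Int))] : PySem.Dict Int Int), (0:Int))
    = (PySem.Dict.mk (tbl l c), (l.count c : Int)) := by
  induction l using List.reverseRecOn with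
  | nil => simp [tbl_nil]; rfl
  | append_singleton p x ih =>
    rw [PySem.List.enumerate_append, List.foldl_append, ih]
    simp only [PySem.List.enumerate_cons, PySem.List.enumerate_nil, List.foldl_cons, List.foldl_nil]
    rw [insert_fresh _ _ _ (by simpa using not_contains_tbl_succ p c)]
    rw [tbl_append]
    have hv : (if (x == c) = true then ((p.count c : Int)) + 1 else ((p.count c : Int)))
        = ((p.count c : Int)) + if (x == c) = true then 1 else 0 := by split <;> omega
    have hcnt : (((p ++ [x]).count c : Nat) : Int) = (p.count c : Int) + if (x == c) = true then 1 else 0 := by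
      push_cast [List.count_append]
      congr 1
      split <;> rename_i h
      · have hx : x = c := by simpa using h
        subst hx; simp
      · have hx : x ≠ c := by simpa using h
        simp [hx, Ne.symm hx]
    simp [hv, hcnt]
    refine ⟨by split <;> omega, ?_⟩
    split <;> rename_i h
    · subst h; simp
    · simp [h, Ne.symm h]

theorem sorted5 : PySem.List.sorted (["A","C","G","T","$"] : List String) (fun k => k) false
    = ["$","A","C","G","T"] := by
  apply PySem.List.sorted_eq_of_perm_of_pairwise_lt
  · decide
  · simp only [String.lt_iff_toList_lt]; decide

def startsE (l : List Char) : List (String × Int) :=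
  [("A", (l.count '$' : Int)), ("C", (l.count '$' : Int) + l.count 'A'),
   ("G", (l.count '$' : Int) + l.count 'A' + l.count 'C'),
   ("T", (l.count '$' : Int) + l.count 'A' + l.count 'C' + l.count 'G'), ("$", 0)]

def occE (l : List Char) : List (String × List (Int × Int)) :=
  [("A", tbl l 'A'), ("C", tbl l 'C'), ("G", tbl l 'G'), ("T", tbl l 'T'), ("$", tbl l '$')]

theorem keys_mk5 (vA vC vG vT vD : Int) :
    (PySem.Dict.mk [("A",vA),("C",vC),("G",vG),("T",vT),("$",vD)]).keys
    = ["A","C","G","T","$"] := rfl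

theorem chainD_eq (g : Char → PySem.Dict Int Int) :
    ((['A','C','G','T','$'] : List Char).foldl
      (fun o c => o.insert (String.ofList [c]) (g c))
      (PySem.Dict.empty : PySem.Dict String (PySem.Dict Int Int)))
    = PySem.Dict.mk [("A", g 'A'),("C", g 'C'),("G", g 'G'),("T", g 'T'),("$", g '$')] := rfl

theorem fpA (l : List Char) : ∀ (vA vC vG vT vD : Int),
    (∀ ch ∈ l, ch ∈ (['A','C','G','T','$'] : List Char)) →
    l.foldl (fun d ch => d.modify (String.ofList [ch]) 0 (· + 1))
      (PySem.Dict.mk [("A",vA),("C",vC),("G",vG),("T",vT),("$",vD)])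
    = PySem.Dict.mk [("A",vA + l.count 'A'),("C",vC + l.count 'C'),("G",vG + l.count 'G'),
                     ("T",vT + l.count 'T'),("$",vD + l.count '$')] := by
  induction l with
  | nil => intro vA vC vG vT vD _; simp
  | cons ch l ih =>
    intro vA vC vG vT vD h
    have hch : ch ∈ (['A','C','G','T','$'] : List Char) := h ch (by simp)
    have hrest : ∀ c ∈ l, c ∈ (['A','C','G','T','$'] : List Char) := fun c hc => h c (by simp [hc])
    simp only [List.mem_cons, List.not_mem_nil, or_false] at hch
    simp only [List.foldl_cons]
    rcases hch with rfl|rfl|rfl|rfl|rfl <;>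
      [rw [show (PySem.Dict.mk [("A",vA),("C",vC),("G",vG),("T",vT),("$",vD)]).modify (String.ofList ['A']) 0 (· + 1)
            = PySem.Dict.mk [("A",vA+1),("C",vC),("G",vG),("T",vT),("$",vD)] from rfl];
       rw [show (PySem.Dict.mk [("A",vA),("C",vC),("G",vG),("T",vT),("$",vD)]).modify (String.ofList ['C']) 0 (· + 1)
            = PySem.Dict.mk [("A",vA),("C",vC+1),("G",vG),("T",vT),("$",vD)] from rfl];
       rw [show (PySem.Dict.mk [("A",vA),("C",vC),("G",vG),("T",vT),("$",vD)]).modify (String.ofList ['G']) 0 (· + 1)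
            = PySem.Dict.mk [("A",vA),("C",vC),("G",vG+1),("T",vT),("$",vD)] from rfl];
       rw [show (PySem.Dict.mk [("A",vA),("C",vC),("G",vG),("T",vT),("$",vD)]).modify (String.ofList ['T']) 0 (· + 1)
            = PySem.Dict.mk [("A",vA),("C",vC),("G",vG),("T",vT+1),("$",vD)] from rfl];
       rw [show (PySem.Dict.mk [("A",vA),("C",vC),("G",vG),("T",vT),("$",vD)]).modify (String.ofList ['$']) 0 (· + 1)
            = PySem.Dict.mk [("A",vA),("C",vC),("G",vG),("T",vT),("$",vD+1)] from rfl]] <;>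
      rw [ih _ _ _ _ _ hrest] <;>
      simp [List.count_cons] <;> omega

theorem tbl_fst_lt (p : List Char) (c : Char) (k : Int) (hk : k ∈ (tbl p c).map (·.1)) :
    k ≤ (p.length : Int) := by
  rw [map_fst_tbl] at hk
  simp only [List.mem_map, List.mem_range] at hk
  obtain ⟨n, hn, rfl⟩ := hk
  omega

theorem fp2A (cA cC cG cT cD : Int) :
    ((["$","A","C","G","T"] : List String).foldl
      (fun st k => (st.1.insert k st.2, st.2 + st.1.getD k 0))
      ((PySem.Dict.mk [("A",cA),("C",cC),("G",cG),("T",cT),("$",cD)] : PySem.Dict String Int), (0:Int))).1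
    = PySem.Dict.mk [("A",0+cD),("C",0+cD+cA),("G",0+cD+cA+cC),("T",0+cD+cA+cC+cG),("$",(0:Int))] := rfl

theorem nodup_keys_tbl_ext (p : List Char) (c : Char) (v : Int) :
    ((tbl p c ++ [(((p.length : Int) + 1), v)]).map (·.1)).Nodup := by
  rw [List.map_append]
  refine List.Nodup.append ?_ (by simp) ?_
  · exact nodup_keys_tbl p c
  · intro k hk hk2
    simp only [List.map_cons, List.map_nil, List.mem_cons, List.not_mem_nil, or_false] at hk2
    subst hk2
    have := tbl_fst_lt p c _ hk
    omega

theorem getD_tbl_ext (p : List Char) (c : Char) (v : Int) :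
    (PySem.Dict.mk (tbl p c ++ [(((p.length : Int) + 1), v)])).getD ((p.length : Int) + 1) 0 = v := by
  apply PySem.Dict.getD_of_mem_items
  · show _ ∈ tbl p c ++ _
    simp
  · exact nodup_keys_tbl_ext p c v

theorem insert_tbl_ext (p : List Char) (c : Char) (v w : Int) :
    (PySem.Dict.mk (tbl p c ++ [(((p.length : Int) + 1), v)])).insert ((p.length : Int) + 1) w
    = PySem.Dict.mk (tbl p c ++ [(((p.length : Int) + 1), w)]) := by
  apply PySem.Dict.ext
  rw [PySem.Dict.items_insert_of_contains]
  · show (tbl p c ++ [(((p.length : Int) + 1), v)]).map _ = _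
    rw [List.map_append]
    congr 1
    · have hq : ∀ q ∈ tbl p c,
          (if (q.1 == ((p.length : Int) + 1)) = true then (((p.length : Int) + 1), w) else q) = id q := by
        intro q hq
        have : q.1 ≤ (p.length : Int) := tbl_fst_lt p c _ (List.mem_map_of_mem hq)
        have hne : (q.1 == ((p.length : Int) + 1)) = false := by
          simp only [beq_eq_false_iff_ne, ne_eq]; omega
        simp [hne]
      rw [List.map_congr_left hq, List.map_id]
    · simp
  · rw [PySem.Dict.contains_eq_decide_mem_keys]
    simp only [decide_eq_true_eq]
    show _ ∈ (tbl p c ++ _).map (·.1)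
    simp

theorem g_tbl (p : List Char) (c : Char) :
    (PySem.Dict.mk (tbl p c)).insert ((p.length : Int) + 1) ((PySem.Dict.mk (tbl p c)).getD (p.length : Int) 0)
    = PySem.Dict.mk (tbl p c ++ [(((p.length : Int) + 1), (p.count c : Int))]) := by
  rw [getD_tbl_last, insert_fresh _ _ _ (not_contains_tbl_succ p c)]

theorem modifyA5 (f : PySem.Dict Int Int → PySem.Dict Int Int) (dA dC dG dT dD : PySem.Dict Int Int) :
    (PySem.Dict.mk [("A",dA),("C",dC),("G",dG),("T",dT),("$",dD)]).modify (String.ofList ['A']) PySem.Dict.empty f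
    = PySem.Dict.mk [("A",f dA),("C",dC),("G",dG),("T",dT),("$",dD)] := rfl
theorem modifyC5 (f : PySem.Dict Int Int → PySem.Dict Int Int) (dA dC dG dT dD : PySem.Dict Int Int) :
    (PySem.Dict.mk [("A",dA),("C",dC),("G",dG),("T",dT),("$",dD)]).modify (String.ofList ['C']) PySem.Dict.empty f
    = PySem.Dict.mk [("A",dA),("C",f dC),("G",dG),("T",dT),("$",dD)] := rfl
theorem modifyG5 (f : PySem.Dict Int Int → PySem.Dict Int Int) (dA dC dG dT dD : PySem.Dict Int Int) :
    (PySem.Dict.mk [("A",dA),("C",dC),("G",dG),("T",dT),("$",dD)]).modify (String.ofList ['G']) PySem.Dict.empty f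
    = PySem.Dict.mk [("A",dA),("C",dC),("G",f dG),("T",dT),("$",dD)] := rfl
theorem modifyT5 (f : PySem.Dict Int Int → PySem.Dict Int Int) (dA dC dG dT dD : PySem.Dict Int Int) :
    (PySem.Dict.mk [("A",dA),("C",dC),("G",dG),("T",dT),("$",dD)]).modify (String.ofList ['T']) PySem.Dict.empty f
    = PySem.Dict.mk [("A",dA),("C",dC),("G",dG),("T",f dT),("$",dD)] := rfl
theorem modifyD5 (f : PySem.Dict Int Int → PySem.Dict Int Int) (dA dC dG dT dD : PySem.Dict Int Int) :
    (PySem.Dict.mk [("A",dA),("C",dC),("G",dG),("T",dT),("$",dD)]).modify (String.ofList ['$']) PySem.Dict.empty f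
    = PySem.Dict.mk [("A",dA),("C",dC),("G",dG),("T",dT),("$",f dD)] := rfl

theorem modifyA5' (f : PySem.Dict Int Int → PySem.Dict Int Int) (dA dC dG dT dD : PySem.Dict Int Int) :
    (PySem.Dict.mk [("A",dA),("C",dC),("G",dG),("T",dT),("$",dD)]).modify "A" PySem.Dict.empty f
    = PySem.Dict.mk [("A",f dA),("C",dC),("G",dG),("T",dT),("$",dD)] := rfl
theorem modifyC5' (f : PySem.Dict Int Int → PySem.Dict Int Int) (dA dC dG dT dD : PySem.Dict Int Int) :
    (PySem.Dict.mk [("A",dA),("C",dC),("G",dG),("T",dT),("$",dD)]).modify "C" PySem.Dict.empty f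
    = PySem.Dict.mk [("A",dA),("C",f dC),("G",dG),("T",dT),("$",dD)] := rfl
theorem modifyG5' (f : PySem.Dict Int Int → PySem.Dict Int Int) (dA dC dG dT dD : PySem.Dict Int Int) :
    (PySem.Dict.mk [("A",dA),("C",dC),("G",dG),("T",dT),("$",dD)]).modify "G" PySem.Dict.empty f
    = PySem.Dict.mk [("A",dA),("C",dC),("G",f dG),("T",dT),("$",dD)] := rfl
theorem modifyT5' (f : PySem.Dict Int Int → PySem.Dict Int Int) (dA dC dG dT dD : PySem.Dict Int Int) :
    (PySem.Dict.mk [("A",dA),("C",dC),("G",dG),("T",dT),("$",dD)]).modify "T" PySem.Dict.empty f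
    = PySem.Dict.mk [("A",dA),("C",dC),("G",dG),("T",f dT),("$",dD)] := rfl
theorem modifyD5' (f : PySem.Dict Int Int → PySem.Dict Int Int) (dA dC dG dT dD : PySem.Dict Int Int) :
    (PySem.Dict.mk [("A",dA),("C",dC),("G",dG),("T",dT),("$",dD)]).modify "$" PySem.Dict.empty f
    = PySem.Dict.mk [("A",dA),("C",dC),("G",dG),("T",dT),("$",f dD)] := rfl

theorem occA (l : List Char) (h : ∀ ch ∈ l, ch ∈ (['A','C','G','T','$'] : List Char)) :
    (PySem.List.enumerate l 0).foldl
      (fun o ic =>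
        let o1 := (["$","A","C","G","T"] : List String).foldl
          (fun o j => o.modify j PySem.Dict.empty (fun d => d.insert (ic.1 + 1) (d.getD ic.1 0))) o
        o1.modify (String.ofList [ic.2]) PySem.Dict.empty
          (fun d => d.insert (ic.1 + 1) (d.getD (ic.1 + 1) 0 + 1)))
      (PySem.Dict.mk [("A", PySem.Dict.mk [((0:Int),(0:Int))]), ("C", PySem.Dict.mk [((0:Int),(0:Int))]),
                      ("G", PySem.Dict.mk [((0:Int),(0:Int))]), ("T", PySem.Dict.mk [((0:Int),(0:Int))]),
                      ("$", PySem.Dict.mk [((0:Int),(0:Int))])])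
    = PySem.Dict.mk [("A", PySem.Dict.mk (tbl l 'A')), ("C", PySem.Dict.mk (tbl l 'C')),
                     ("G", PySem.Dict.mk (tbl l 'G')), ("T", PySem.Dict.mk (tbl l 'T')),
                     ("$", PySem.Dict.mk (tbl l '$'))] := by
  induction l using List.reverseRecOn with
  | nil => simp [tbl_nil]
  | append_singleton p x ih =>
    have hrest : ∀ ch ∈ p, ch ∈ (['A','C','G','T','$'] : List Char) := fun c hc => h c (by simp [hc])
    have hx : x ∈ (['A','C','G','T','$'] : List Char) := h x (by simp)
    rw [PySem.List.enumerate_append, List.foldl_append, ih hrest]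
    simp only [PySem.List.enumerate_cons, PySem.List.enumerate_nil, List.foldl_cons, List.foldl_nil,
      zero_add, modifyD5', modifyA5', modifyC5', modifyG5', modifyT5', g_tbl]
    simp only [List.mem_cons, List.not_mem_nil, or_false] at hx
    rcases hx with rfl|rfl|rfl|rfl|rfl <;>
      simp only [modifyA5, modifyC5, modifyG5, modifyT5, modifyD5, getD_tbl_ext, insert_tbl_ext] <;>
      simp [tbl_append]

theorem altB (bwt : String) (h : ∀ ch ∈ bwt.toList, ch ∈ (['A','C','G','T','$'] : List Char)) :
    PreprocessBWT_alt bwt = (startsE bwt.toList, occE bwt.toList) := by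
  unfold PreprocessBWT_alt
  have h0 : (PySem.Dict.ofList [("A",(0:Int)),("C",0),("G",0),("T",0),("$",0)] : PySem.Dict String Int)
      = PySem.Dict.mk [("A",0),("C",0),("G",0),("T",0),("$",0)] := rfl
  simp only [h0, fpA bwt.toList 0 0 0 0 0 h, keys_mk5, sorted5, fp2A, colB, chainD_eq]
  simp [startsE, occE]

theorem AeqE (bwt : String) (h : ∀ ch ∈ bwt.toList, ch ∈ (['A','C','G','T','$'] : List Char)) :
    PreprocessBWT bwt = (startsE bwt.toList, occE bwt.toList) := by
  unfold PreprocessBWT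
  have h0 : (PySem.Dict.ofList [("A",(0:Int)),("C",0),("G",0),("T",0),("$",0)] : PySem.Dict String Int)
      = PySem.Dict.mk [("A",0),("C",0),("G",0),("T",0),("$",0)] := rfl
  have hocc0 : (PySem.Dict.ofList [("A", PySem.Dict.ofList [((0:Int),(0:Int))]), ("C", PySem.Dict.ofList [((0:Int),(0:Int))]),
      ("G", PySem.Dict.ofList [((0:Int),(0:Int))]), ("T", PySem.Dict.ofList [((0:Int),(0:Int))]),
      ("$", PySem.Dict.ofList [((0:Int),(0:Int))])] : PySem.Dict String (PySem.Dict Int Int))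
      = PySem.Dict.mk [("A", PySem.Dict.mk [((0:Int),(0:Int))]), ("C", PySem.Dict.mk [((0:Int),(0:Int))]),
      ("G", PySem.Dict.mk [((0:Int),(0:Int))]), ("T", PySem.Dict.mk [((0:Int),(0:Int))]),
      ("$", PySem.Dict.mk [((0:Int),(0:Int))])] := rfl
  simp only [h0, hocc0, fpA bwt.toList 0 0 0 0 0 h, keys_mk5, sorted5, fp2A, occA bwt.toList h]
  simp [startsE, occE]

-- ===== VERDICT (by name: the statement is the Claim_ definition above) =====
theorem PreprocessBWT_spec : Claim_equal_PreprocessBWT := by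
  intro bwt _ hpre
  have h : ∀ c ∈ bwt.toList, c ∈ (['A','C','G','T','$'] : List Char) := by
    rw [Pre_PreprocessBWT, List.all_eq_true] at hpre
    intro c hc
    simpa using hpre c hc
  show PreprocessBWT bwt = PreprocessBWT_alt bwt
  rw [AeqE bwt h, altB bwt h]
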